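-- pv_equiv track=rewrite | github.com/8080509/Number_Theory | Python Code/PinnacleCounts_Trimmed.py | compCount
-- ===== SOURCE A (Python) =====
-- factorialMemo = [1]
--
-- def factorialMemoBuild(N):
-- 	k = len(factorialMemo)
-- 	prev = factorialMemo[k - 1]
-- 	while k <= N:
-- 		prev *= k
-- 		factorialMemo.append(prev)
-- 		k += 1
-- 	return prev
--
-- def factorial(n):
-- 	if n < len(factorialMemo): return factorialMemo[n]
-- 	return factorialMemoBuild(n)
--
-- def binom(n, k): return factorial(n) // (factorial(k) * factorial(n - k))
--
-- def binom2(n): return (n * (n - 1)) >> 1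
--
-- def neg1Pow(e):
-- 	return 1 - ((e & 1) << 1)
--
-- def compCount(ell, g, t):
-- 	N = 1
-- 	prod = 1
-- 	for i in range(ell):
-- 		ti = t[i]
-- 		acc = 0
-- 		for k in range(ti+1):
-- 			acc += binom(ti, k) * neg1Pow(k) * (N ** g[i])
-- 			N += 1
-- 		N -= 1
-- 		acc //= factorial(ti)
-- 		prod *= binom2(N) * neg1Pow(ti) * acc
-- 		N -= 1
-- 	return prod
-- ===== SOURCE B (Python) =====
-- def compCount(ell, g, t):
--     N = 1
--     prod = 1
--     for i in range(ell):
--         ti = t[i]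
--         gi = g[i]
--         # finite-difference table: ti rounds of adjacent subtraction on the power
--         # sequence [(N+k)**gi] give sum_k (-1)^k C(ti,k) (N+k)**gi with no binomials
--         w = [(N + k) ** gi for k in range(ti + 1)]
--         for _ in range(ti):
--             w = [a - b for a, b in zip(w, w[1:])]
--         f = 1
--         for k in range(1, ti + 1):
--             f *= k
--         N += ti
--         prod *= (N * (N - 1) // 2) * (-1 if ti & 1 else 1) * (w[0] // f)
--         N -= 1
--     return prod
-- ===== Notes on version B (the rewrite author's own statement) =====
-- stated objective: alternative
-- what changed: B computes each group's alternating binomial sum as the ti-th forward finite difference of the power sequence [(N+k)**gi] via ti rounds of adjacent subtraction (the identity (I-S)^t = sum (-1)^k C(t,k) S^k), so no binomial coefficients or factorial tables appear in the summation at all.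
-- outside the precondition, e.g. on compCount(1, [-1], [2]): A returns 0.0, B returns 0.0; on compCount(1, [2], [-1]): A returns 0, B raises IndexError; on compCount(2, [1], [1, 1]): A raises IndexError, B raises IndexError
import Mathlib
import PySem

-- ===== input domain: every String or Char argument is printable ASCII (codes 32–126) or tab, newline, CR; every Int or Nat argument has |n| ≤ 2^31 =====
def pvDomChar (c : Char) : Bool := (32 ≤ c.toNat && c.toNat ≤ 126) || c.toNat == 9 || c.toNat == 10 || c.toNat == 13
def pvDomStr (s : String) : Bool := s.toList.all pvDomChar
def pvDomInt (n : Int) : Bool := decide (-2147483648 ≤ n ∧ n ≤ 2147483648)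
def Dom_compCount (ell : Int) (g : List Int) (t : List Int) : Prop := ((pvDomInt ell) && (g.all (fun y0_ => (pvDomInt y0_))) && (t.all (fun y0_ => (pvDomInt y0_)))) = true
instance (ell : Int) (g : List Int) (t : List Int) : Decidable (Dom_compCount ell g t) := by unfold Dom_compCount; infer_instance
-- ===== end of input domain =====

-- B computes each group's alternating binomial sum as the ti-th finite difference of the power
-- sequence (ti rounds of adjacent subtraction), so no binomials or factorial tables appear in
-- the summation; an alternative algorithm of similar cost, not claimed faster.

-- ===== PORT A =====
-- factorial: A memoises in a global list; restricted to n ≥ 0 (Pre_ excludes negative t entries,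
-- where A reads the memo at a negative index) the memo is pure, so the port is the plain product
-- prev *= k for k = 1..n that factorialMemoBuild runs, with memo[0] = 1 returned for n < 1.
def pvFactA (n : Int) : Int :=
  if n < 1 then 1
  else (PySem.List.pyRange 1 (n + 1)).foldl (fun prev k => prev * k) 1

def pvBinomA (n k : Int) : Int :=
  PySem.Int.floordiv (pvFactA n) (pvFactA k * pvFactA (n - k))

-- binom2(n) = (n * (n - 1)) >> 1
def pvBinom2A (n : Int) : Int := (n * (n - 1)) >>> (1 : Nat)

-- neg1Pow(e) = 1 - ((e & 1) << 1)
def pvNeg1PowA (e : Int) : Int := 1 - (PySem.Int.band e 1 <<< (1 : Nat))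

-- N ** g[i]: exponent taken as Nat; Pre_ guarantees g[i] ≥ 0 (Python returns a float otherwise);
-- t[i], g[i] read with default 0, in range under Pre_.
def compCount (ell : Int) (g : List Int) (t : List Int) : Int :=
  ((PySem.List.pyRange 0 ell).foldl (fun (s : Int × Int) i =>
    let ti := PySem.List.pyGetD t i 0
    let inner := (PySem.List.pyRange 0 (ti + 1)).foldl
      (fun (q : Int × Int) k =>
        (q.1 + pvBinomA ti k * pvNeg1PowA k * q.2 ^ (PySem.List.pyGetD g i 0).toNat,
         q.2 + 1))
      (0, s.1)
    let N := inner.2 - 1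
    let acc := PySem.Int.floordiv inner.1 (pvFactA ti)
    (N - 1, s.2 * (pvBinom2A N * pvNeg1PowA ti * acc)))
    (1, 1)).2

-- ===== PORT B =====
-- one round of adjacent subtraction: [a - b for a, b in zip(w, w[1:])]
def pvDiffB (w : List Int) : List Int := (w.zip w.tail).map (fun p => p.1 - p.2)

-- w[0] read with default 0: w is provably nonempty under Pre_ (length ti+1 minus ti rounds)
def compCount_alt (ell : Int) (g : List Int) (t : List Int) : Int :=
  ((PySem.List.pyRange 0 ell).foldl (fun (s : Int × Int) i =>
    let ti := PySem.List.pyGetD t i 0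
    let gi := PySem.List.pyGetD g i 0
    let w0 := (PySem.List.pyRange 0 (ti + 1)).map (fun k => (s.1 + k) ^ gi.toNat)
    let w := (PySem.List.pyRange 0 ti).foldl (fun w _ => pvDiffB w) w0
    let f := (PySem.List.pyRange 1 (ti + 1)).foldl (fun a k => a * k) 1
    let N := s.1 + ti
    (N - 1, s.2 * (PySem.Int.floordiv (N * (N - 1)) 2 *
      (if PySem.Int.band ti 1 ≠ 0 then -1 else 1) *
      PySem.Int.floordiv (PySem.List.pyGetD w 0 0) f)))
    (1, 1)).2

-- ===== PRECONDITION & SPEC =====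
-- Pre_ excludes: ell beyond len(g)/len(t) (IndexError); negative g[i] (N ** g[i] is then a float,
-- not an int); negative t[i], where A indexes the global factorial memo at a negative position —
-- IndexError on a fresh module for t[i] ≤ -2, an accidental wraparound value otherwise — and B's
-- difference table is empty (IndexError at w[0]).
def Pre_compCount (ell : Int) (g : List Int) (t : List Int) : Prop :=
  ell ≤ (g.length : Int) ∧ ell ≤ (t.length : Int) ∧
  (∀ x ∈ g.take ell.toNat, 0 ≤ x) ∧ (∀ x ∈ t.take ell.toNat, 0 ≤ x)
instance (ell : Int) (g : List Int) (t : List Int) : Decidable (Pre_compCount ell g t) := by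
  unfold Pre_compCount; infer_instance

def pvWitness_compCount : Int × List Int × List Int := (2, [2, 1], [3, 0])

def Spec_compCount (ell : Int) (g : List Int) (t : List Int) (out : Int) : Prop := out = compCount_alt ell g t
instance (ell : Int) (g : List Int) (t : List Int) (out : Int) : Decidable (Spec_compCount ell g t out) := by unfold Spec_compCount; infer_instance

-- ===== CLAIM (what is proved, stated in full; the proofs are below) =====
def Claim_equal_compCount : Prop := ∀ (ell : Int) (g : List Int) (t : List Int), Dom_compCount ell g t → Pre_compCount ell g t → Spec_compCount ell g t (compCount ell g t)

-- ===== LEMMAS AND PROOFS =====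

theorem pvFactAux (n : Nat) :
    (PySem.List.pyRange 1 ((n : Int) + 1)).foldl (fun prev k => prev * k) 1 = (n.factorial : Int) := by
  induction n with
  | zero =>
    have h : PySem.List.pyRange 1 ((0 : Nat) + 1 : Int) = [] :=
      List.eq_nil_iff_forall_not_mem.mpr fun x hx => by
        have := PySem.List.mem_pyRange_one.mp hx; omega
    rw [h]; norm_num [Nat.factorial]
  | succ j ih =>
    have h1 : (1 : Int) ≤ (j : Int) + 1 := by omega
    have h2 : ((j + 1 : Nat) : Int) + 1 = ((j : Int) + 1) + 1 := by push_cast; ring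
    rw [h2, PySem.List.pyRange_one_succ_right h1, List.foldl_append, ih]
    simp only [List.foldl_cons, List.foldl_nil, Nat.factorial_succ]
    push_cast; ring

theorem pvFactA_natCast (n : Nat) : pvFactA (n : Int) = (n.factorial : Int) := by
  cases n with
  | zero => rw [pvFactA, if_pos (by norm_num)]; norm_num [Nat.factorial]
  | succ j => rw [pvFactA, if_neg (by omega)]; exact pvFactAux (j + 1)

theorem pvBinomA_natCast (n k : Nat) (h : k ≤ n) :
    pvBinomA (n : Int) (k : Int) = (n.choose k : Int) := by
  rw [pvBinomA]
  have hsub : (n : Int) - (k : Int) = ((n - k : Nat) : Int) := by omega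
  rw [hsub, pvFactA_natCast, pvFactA_natCast, pvFactA_natCast,
    show ((k.factorial : Int) * ((n - k).factorial : Int))
      = ((k.factorial * (n - k).factorial : Nat) : Int) by push_cast; ring,
    PySem.Int.floordiv_natCast, Nat.choose_eq_factorial_div_factorial h]

theorem pvNeg1PowA_natCast (k : Nat) : pvNeg1PowA (k : Int) = (-1) ^ k := by
  rw [pvNeg1PowA,
    show PySem.Int.band (k : Int) 1 = ((k % 2 : Nat) : Int) by
      rw [show (1 : Int) = ((1 : Nat) : Int) from rfl, PySem.Int.band_natCast,
        Nat.and_one_is_mod]]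
  rcases Nat.even_or_odd k with he | ho
  · rw [Nat.even_iff.mp he, he.neg_one_pow, Int.shiftLeft_eq]; norm_num
  · rw [Nat.odd_iff.mp ho, ho.neg_one_pow, Int.shiftLeft_eq]; norm_num

theorem pvBinom2A_eq (n : Int) : pvBinom2A n = PySem.Int.floordiv (n * (n - 1)) 2 := by
  have hnn : 0 ≤ n * (n - 1) := by
    rcases le_total n 0 with hn | hn
    · nlinarith [mul_nonneg (show (0:Int) ≤ -n by omega) (show (0:Int) ≤ 1 - n by omega)]
    · rcases eq_or_lt_of_le hn with h0 | h0
      · simp [← h0]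
      · nlinarith [mul_nonneg (show (0:Int) ≤ n by omega) (show (0:Int) ≤ n - 1 by omega)]
  rw [pvBinom2A]
  obtain ⟨m, hm⟩ : ∃ m : Nat, n * (n - 1) = (m : Int) := ⟨(n * (n - 1)).toNat, by omega⟩
  rw [hm, ← Int.natCast_shiftRight, Nat.shiftRight_eq_div_pow,
    show (2 : Int) = ((2 : Nat) : Int) from rfl, PySem.Int.floordiv_natCast]

theorem pvBandSign (tn : Nat) :
    (if PySem.Int.band (tn : Int) 1 ≠ 0 then (-1 : Int) else 1) = (-1) ^ tn := by
  rw [show PySem.Int.band (tn : Int) 1 = ((tn % 2 : Nat) : Int) by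
      rw [show (1 : Int) = ((1 : Nat) : Int) from rfl, PySem.Int.band_natCast,
        Nat.and_one_is_mod]]
  rcases Nat.even_or_odd tn with he | ho
  · rw [Nat.even_iff.mp he, he.neg_one_pow]; norm_num
  · rw [Nat.odd_iff.mp ho, ho.neg_one_pow]; norm_num

-- the common reference value of both inner computations
def pvRefSum (tn : Nat) (N0 : Int) (ge : Nat) (m : Nat) : Int :=
  ∑ k ∈ Finset.range m, ((tn.choose k : Int) * (-1) ^ k * (N0 + k) ^ ge)

theorem innerA_spec (tn : Nat) (N0 : Int) (ge : Nat) :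
    ∀ m, m ≤ tn + 1 →
    List.foldl
      (fun (q : Int × Int) k =>
        (q.1 + pvBinomA (tn : Int) k * pvNeg1PowA k * q.2 ^ ge, q.2 + 1)) (0, N0)
      (List.map (fun (k : Nat) => (k : Int)) (List.range m))
      = (pvRefSum tn N0 ge m, N0 + m) := by
  intro m
  induction m with
  | zero => intro _; simp [pvRefSum]
  | succ j ih =>
    intro hm
    rw [List.range_succ, List.map_append, List.foldl_append, ih (by omega)]
    simp only [List.map_cons, List.map_nil, List.foldl_cons, List.foldl_nil]
    rw [pvBinomA_natCast tn j (by omega), pvNeg1PowA_natCast]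
    have h1 : pvRefSum tn N0 ge (j + 1)
        = pvRefSum tn N0 ge j + (tn.choose j : Int) * (-1) ^ j * (N0 + j) ^ ge := by
      rw [pvRefSum, pvRefSum, Finset.sum_range_succ]
    simp only [Prod.mk.injEq]
    exact ⟨by rw [h1], by push_cast; ring⟩

theorem innerA_full (tn : Nat) (N0 : Int) (ge : Nat) :
    (PySem.List.pyRange 0 ((tn : Int) + 1)).foldl
      (fun (q : Int × Int) k =>
        (q.1 + pvBinomA (tn : Int) k * pvNeg1PowA k * q.2 ^ ge, q.2 + 1)) (0, N0)
      = (pvRefSum tn N0 ge (tn + 1), N0 + ((tn + 1 : Nat) : Int)) := by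
  rw [show ((tn : Int) + 1) = ((tn + 1 : Nat) : Int) by push_cast; ring,
    PySem.List.pyRange_zero_natCast]
  exact innerA_spec tn N0 ge (tn + 1) le_rfl

-- B side: the m-th finite difference at offset j
def pvSB (f : Nat → Int) (m j : Nat) : Int :=
  ∑ k ∈ Finset.range (m + 1), (m.choose k : Int) * (-1) ^ k * f (j + k)

theorem pvDiffB_mapRange (f : Nat → Int) (n : Nat) :
    pvDiffB ((List.range (n + 1)).map f) = (List.range n).map (fun j => f j - f (j + 1)) := by
  apply List.ext_getElem
  · simp [pvDiffB]
  · intro j h1 h2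
    simp [pvDiffB, List.getElem_zip, List.getElem_tail]

theorem pvSB_succ (f : Nat → Int) (m j : Nat) :
    pvSB f (m + 1) j = pvSB f m j - pvSB f m (j + 1) := by
  have hL : pvSB f (m + 1) j
      = (∑ k ∈ Finset.range (m + 1), ((m + 1).choose (k + 1) : Int) * (-1) ^ (k + 1) * f (j + (k + 1)))
        + f j := by
    rw [pvSB, Finset.sum_range_succ']; simp
  have hsplit : ∀ k ∈ Finset.range (m + 1),
      ((m + 1).choose (k + 1) : Int) * (-1) ^ (k + 1) * f (j + (k + 1))
      = (m.choose k : Int) * (-1) ^ (k + 1) * f (j + (k + 1))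
        + (m.choose (k + 1) : Int) * (-1) ^ (k + 1) * f (j + (k + 1)) := by
    intro k _
    rw [Nat.choose_succ_succ]
    push_cast; ring
  rw [hL, Finset.sum_congr rfl hsplit, Finset.sum_add_distrib]
  have h1 : (∑ k ∈ Finset.range (m + 1), (m.choose k : Int) * (-1) ^ (k + 1) * f (j + (k + 1)))
      = -pvSB f m (j + 1) := by
    rw [pvSB, ← Finset.sum_neg_distrib]
    apply Finset.sum_congr rfl
    intro k _
    have : j + (k + 1) = j + 1 + k := by omega
    rw [this]; ring
  have h2 : (∑ k ∈ Finset.range (m + 1), (m.choose (k + 1) : Int) * (-1) ^ (k + 1) * f (j + (k + 1)))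
      = pvSB f m j - f j := by
    rw [Finset.sum_range_succ, Nat.choose_succ_self]
    rw [pvSB, Finset.sum_range_succ']
    simp
  rw [h1, h2]; ring

theorem pvDiffIter (f : Nat → Int) :
    ∀ m n, m ≤ n →
    pvDiffB^[m] ((List.range (n + 1)).map f) = (List.range (n + 1 - m)).map (fun j => pvSB f m j) := by
  intro m
  induction m with
  | zero =>
    intro n _
    simp only [Function.iterate_zero, id_eq, Nat.sub_zero]
    apply List.map_congr_left
    intro j _
    simp [pvSB]
  | succ i ih =>
    intro n hm
    rw [Function.iterate_succ_apply', ih n (by omega),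
      show n + 1 - i = (n - i - 1) + 1 + 1 by omega, pvDiffB_mapRange,
      show n + 1 - (i + 1) = (n - i - 1) + 1 by omega]
    apply List.map_congr_left
    intro j _
    exact (pvSB_succ f i j).symm

theorem foldl_const_diff : ∀ (l : List Int) (w : List Int),
    l.foldl (fun w _ => pvDiffB w) w = pvDiffB^[l.length] w := by
  intro l
  induction l with
  | nil => intro w; rfl
  | cons x xs ih =>
    intro w
    simp only [List.foldl_cons, List.length_cons]
    rw [ih (pvDiffB w), Function.iterate_succ_apply]

theorem innerB_full (tn : Nat) (N0 : Int) (ge : Nat) :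
    PySem.List.pyGetD
      ((PySem.List.pyRange 0 (tn : Int)).foldl (fun w _ => pvDiffB w)
        ((PySem.List.pyRange 0 ((tn : Int) + 1)).map (fun k => (N0 + k) ^ ge))) 0 0
    = pvRefSum tn N0 ge (tn + 1) := by
  rw [show ((tn : Int) + 1) = ((tn + 1 : Nat) : Int) by push_cast; ring,
    PySem.List.pyRange_zero_natCast, PySem.List.pyRange_zero_natCast, List.map_map,
    foldl_const_diff]
  have hlen : ((List.range tn).map (fun (k : Nat) => (k : Int))).length = tn := by simp
  rw [hlen]
  simp only [Function.comp_def]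
  rw [pvDiffIter (fun k => (N0 + (k : Int)) ^ ge) tn tn le_rfl]
  simp only [Nat.add_sub_cancel_left, List.range_one, List.map_cons, List.map_nil]
  rw [show ((0 : Int)) = ((0 : Nat) : Int) from rfl, PySem.List.pyGetD_natCast]
  simp only [List.getD_cons_zero]
  rw [pvSB, pvRefSum]
  apply Finset.sum_congr rfl
  intro k _
  simp

theorem step_eq (g t : List Int) (i : Int) (hti : 0 ≤ PySem.List.pyGetD t i 0) (s : Int × Int) :
    (let ti := PySem.List.pyGetD t i 0
     let inner := (PySem.List.pyRange 0 (ti + 1)).foldl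
       (fun (q : Int × Int) k =>
         (q.1 + pvBinomA ti k * pvNeg1PowA k * q.2 ^ (PySem.List.pyGetD g i 0).toNat, q.2 + 1))
       (0, s.1)
     let N := inner.2 - 1
     let acc := PySem.Int.floordiv inner.1 (pvFactA ti)
     ((N - 1, s.2 * (pvBinom2A N * pvNeg1PowA ti * acc)) : Int × Int))
    = (let ti := PySem.List.pyGetD t i 0
       let gi := PySem.List.pyGetD g i 0
       let w0 := (PySem.List.pyRange 0 (ti + 1)).map (fun k => (s.1 + k) ^ gi.toNat)
       let w := (PySem.List.pyRange 0 ti).foldl (fun w _ => pvDiffB w) w0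
       let f := (PySem.List.pyRange 1 (ti + 1)).foldl (fun a k => a * k) 1
       let N := s.1 + ti
       ((N - 1, s.2 * (PySem.Int.floordiv (N * (N - 1)) 2 *
         (if PySem.Int.band ti 1 ≠ 0 then -1 else 1) *
         PySem.Int.floordiv (PySem.List.pyGetD w 0 0) f)) : Int × Int)) := by
  obtain ⟨tn, htn⟩ : ∃ tn : Nat, PySem.List.pyGetD t i 0 = (tn : Int) :=
    ⟨(PySem.List.pyGetD t i 0).toNat, (Int.toNat_of_nonneg hti).symm⟩
  simp only [htn]
  rw [innerA_full tn s.1 (PySem.List.pyGetD g i 0).toNat,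
    innerB_full tn s.1 (PySem.List.pyGetD g i 0).toNat, pvFactAux]
  simp only [Prod.mk.injEq]
  constructor
  · push_cast; ring
  · rw [pvFactA_natCast, pvNeg1PowA_natCast, pvBandSign, pvBinom2A_eq,
      show (s.1 + ((tn + 1 : Nat) : Int) - 1) = s.1 + (tn : Int) by push_cast; ring]

-- ===== VERDICT (by name: the statement is the Claim_ definition above) =====
theorem compCount_spec : Claim_equal_compCount := by
  intro ell g t _hdom hpre
  obtain ⟨hp1, hp2, hp3, hp4⟩ := hpre
  unfold Spec_compCount compCount compCount_alt
  congr 1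
  apply PySem.List.foldl_congr_mem
  intro acc x hx
  have hxb := PySem.List.mem_pyRange_one.mp hx
  have hti : 0 ≤ PySem.List.pyGetD t x 0 := by
    obtain ⟨j, rfl⟩ : ∃ j : Nat, x = (j : Int) := ⟨x.toNat, by omega⟩
    have hjt : j < t.length := by omega
    rw [PySem.List.pyGetD_natCast, List.getD_eq_getElem t 0 hjt]
    have hjl : j < (t.take ell.toNat).length := by
      simp only [List.length_take]; omega
    have hget : (t.take ell.toNat)[j] = t[j] := List.getElem_take
    exact hp4 _ (hget ▸ List.getElem_mem hjl)
  exact step_eq g t x hti acc
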